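-- pv_equiv track=rewrite | github.com/wwh0411/FedMABench | data_process/utils/som_prune.py | get_full_hierarchy
-- ===== SOURCE A (Python) =====
-- def get_full_hierarchy(hierarchy):
--     all_hierarchies = set(hierarchy)
--     for h in hierarchy:
--         parts = h.split('.')
--         for i in range(1, len(parts)):
--             parent_hierarchy = '.'.join(parts[:i])
--             all_hierarchies.add(parent_hierarchy)
--     return sorted(list(all_hierarchies))
-- ===== SOURCE B (Python) =====
-- def get_full_hierarchy(hierarchy):
--     # Worklist closure: repeatedly map the whole frontier to its parents (strip
--     # the last dotted component), pruning anything already seen, so a shared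
--     # ancestor is stripped and processed exactly once across all inputs.
--     seen = set(hierarchy)
--     frontier = set(hierarchy)
--     while frontier:
--         frontier = {s[:i] for s in frontier if (i := s.rfind('.')) != -1} - seen
--         seen |= frontier
--     return sorted(seen)
-- ===== Notes on version B (the rewrite author's own statement) =====
-- stated objective: alternative
-- what changed: B replaces A's per-string enumeration of every dotted prefix (split into parts, join each front slice) with a worklist/BFS closure: the whole frontier set is mapped to its parents (last component stripped) level by level with visited-set pruning, so each distinct ancestor is computed from exactly one child once, instead of being re-derived for every descendant string.
import Mathlib
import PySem

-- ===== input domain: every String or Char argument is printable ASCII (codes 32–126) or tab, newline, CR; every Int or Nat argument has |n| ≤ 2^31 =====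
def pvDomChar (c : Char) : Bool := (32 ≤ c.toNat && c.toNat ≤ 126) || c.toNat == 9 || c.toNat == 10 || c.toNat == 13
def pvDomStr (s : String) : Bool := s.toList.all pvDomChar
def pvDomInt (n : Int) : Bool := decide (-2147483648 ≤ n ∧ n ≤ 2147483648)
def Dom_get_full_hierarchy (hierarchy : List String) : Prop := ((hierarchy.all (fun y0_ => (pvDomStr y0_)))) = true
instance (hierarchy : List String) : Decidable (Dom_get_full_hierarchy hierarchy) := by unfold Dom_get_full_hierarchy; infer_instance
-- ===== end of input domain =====

-- B replaces A's per-string enumeration of every dotted prefix (split + join of each front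
-- slice) by a worklist/BFS closure: the whole frontier set is mapped level by level to its
-- parents (last component stripped) with visited-set pruning; equal return value proved.

-- ===== PORT A =====
-- literal transliteration of A: set(hierarchy); for h: parts = h.split('.');
-- for i in range(1, len(parts)): add('.'.join(parts[:i])); return sorted(list(set))
def get_full_hierarchy (hierarchy : List String) : List String :=
  PySem.List.sorted
    (hierarchy.foldl
      (fun acc h =>
        (PySem.List.pyRange 1 ((PySem.Chars.splitOn h.toList ['.']).length : Int)).foldl
          (fun acc2 i =>
            PySem.Set.add acc2
              (String.ofList (PySem.Chars.join ['.']
                (PySem.List.slice (PySem.Chars.splitOn h.toList ['.']) none (some i)))))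
          acc)
      (PySem.Set.ofList hierarchy))
    (fun x => x)

-- ===== PORT B =====
-- lemmas cited by port B's decreasing_by (termination of the while loop):
lemma pvRfindGo_spec (s sub : List Char) (j : Nat) :
    (PySem.Chars.rfind.go s sub j = -1 ∧ ∀ k, k ≤ j → sub.isPrefixOf (s.drop k) = false) ∨
    (∃ k : Nat, k ≤ j ∧ PySem.Chars.rfind.go s sub j = (k : Int) ∧
      sub.isPrefixOf (s.drop k) = true ∧
      ∀ m, k < m → m ≤ j → sub.isPrefixOf (s.drop m) = false) := by
  induction j with
  | zero =>
    cases h : sub.isPrefixOf s with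
    | true =>
      refine Or.inr ⟨0, le_refl 0, by simp [PySem.Chars.rfind.go, h], by simpa using h, ?_⟩
      intro m h1 h2; omega
    | false =>
      refine Or.inl ⟨by simp [PySem.Chars.rfind.go, h], ?_⟩
      intro k hk
      have hk0 : k = 0 := Nat.le_zero.mp hk
      subst hk0
      simpa using h
  | succ j ih =>
    cases h : sub.isPrefixOf (s.drop (j+1)) with
    | true =>
      refine Or.inr ⟨j+1, le_refl _, by simp [PySem.Chars.rfind.go, h], h, ?_⟩
      intro m h1 h2; omega
    | false =>
      have hgo : PySem.Chars.rfind.go s sub (j+1) = PySem.Chars.rfind.go s sub j := by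
        simp [PySem.Chars.rfind.go, h]
      rcases ih with ⟨h1, h2⟩ | ⟨k, hk, hgo', hp, hmax⟩
      · refine Or.inl ⟨hgo.trans h1, ?_⟩
        intro k hk
        rcases Nat.lt_succ_iff_lt_or_eq.mp (Nat.lt_succ_of_le hk) with h' | h'
        · exact h2 k (by omega)
        · subst h'; exact h
      · refine Or.inr ⟨k, Nat.le_succ_of_le hk, hgo.trans hgo', hp, ?_⟩
        intro m h1m h2m
        rcases Nat.lt_succ_iff_lt_or_eq.mp (Nat.lt_succ_of_le h2m) with h' | h'
        · exact hmax m h1m (by omega)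
        · subst h'; exact h

lemma pvRfind_dot_bound (s : List Char) (h : ¬ PySem.Chars.rfind s ['.'] = -1) :
    0 ≤ PySem.Chars.rfind s ['.'] ∧ (PySem.Chars.rfind s ['.']).toNat < s.length := by
  have hs : PySem.Chars.rfind s ['.'] = PySem.Chars.rfind.go s ['.'] s.length := rfl
  rcases pvRfindGo_spec s ['.'] s.length with ⟨h1, _⟩ | ⟨k, hk, hgo, hp, _⟩
  · exact absurd (hs.trans h1) h
  · rw [hs, hgo]
    have hne : s.drop k ≠ [] := by
      intro he
      rw [he] at hp
      simp [List.isPrefixOf] at hp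
    have hk2 : k < s.length := by
      by_contra hge
      exact hne (List.drop_eq_nil_of_le (by omega))
    exact ⟨Int.natCast_nonneg k, by simpa using hk2⟩

lemma pvToList_ofList (l : List Char) : (String.ofList l).toList = l := by simp

-- s[:i] with i = s.rfind('.') (only used when the rfind succeeded)
def pvParentStr (s : String) : String :=
  String.ofList (PySem.Chars.slice s.toList none (some (PySem.Chars.rfind s.toList ['.'])))

lemma pvParent_len (s : String) (h : ¬ PySem.Chars.rfind s.toList ['.'] = -1) :
    (pvParentStr s).toList.length < s.toList.length := by
  have hb := pvRfind_dot_bound s.toList h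
  unfold pvParentStr
  rw [pvToList_ofList, PySem.Chars.slice_eq_listSlice, PySem.List.slice_to _ hb.1]
  simp only [List.length_take]
  omega

-- the set comprehension {s[:i] for s in frontier if (i := s.rfind('.')) != -1}
def pvStep (frontier : PySem.Set String) : PySem.Set String :=
  frontier.foldl
    (fun acc s =>
      if PySem.Chars.rfind s.toList ['.'] = -1 then acc
      else PySem.Set.add acc (pvParentStr s))
    PySem.Set.empty

lemma pvStep_mem_aux (L : List String) :
    ∀ (acc : PySem.Set String) (x : String),
      x ∈ L.foldl (fun acc s =>
        if PySem.Chars.rfind s.toList ['.'] = -1 then acc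
        else PySem.Set.add acc (pvParentStr s)) acc
      ↔ x ∈ acc ∨ ∃ s ∈ L, ¬ PySem.Chars.rfind s.toList ['.'] = -1 ∧ x = pvParentStr s := by
  induction L with
  | nil => intro acc x; simp
  | cons b L ih =>
    intro acc x
    simp only [List.foldl_cons]
    by_cases hb : PySem.Chars.rfind b.toList ['.'] = -1
    · rw [if_pos hb, ih]
      constructor
      · rintro (h | ⟨s, hs, hd, hx⟩)
        · exact Or.inl h
        · exact Or.inr ⟨s, List.mem_cons_of_mem _ hs, hd, hx⟩
      · rintro (h | ⟨s, hs, hd, hx⟩)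
        · exact Or.inl h
        · rcases List.mem_cons.mp hs with rfl | hs'
          · exact absurd hb hd
          · exact Or.inr ⟨s, hs', hd, hx⟩
    · rw [if_neg hb, ih]
      rw [PySem.Set.mem_add]
      constructor
      · rintro ((h | h) | ⟨s, hs, hd, hx⟩)
        · exact Or.inl h
        · exact Or.inr ⟨b, List.mem_cons_self, hb, h⟩
        · exact Or.inr ⟨s, List.mem_cons_of_mem _ hs, hd, hx⟩
      · rintro (h | ⟨s, hs, hd, hx⟩)
        · exact Or.inl (Or.inl h)
        · rcases List.mem_cons.mp hs with rfl | hs'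
          · exact Or.inl (Or.inr hx)
          · exact Or.inr ⟨s, hs', hd, hx⟩

lemma pvStep_mem (frontier : PySem.Set String) (x : String) :
    x ∈ pvStep frontier ↔
      ∃ s ∈ frontier, ¬ PySem.Chars.rfind s.toList ['.'] = -1 ∧ x = pvParentStr s := by
  unfold pvStep
  rw [pvStep_mem_aux]
  simp [PySem.Set.empty]

-- max string length in a list (termination measure of the while loop)
def pvMaxLen (l : List String) : Nat := l.foldr (fun s m => max s.toList.length m) 0

lemma pvMaxLen_le (l : List String) (x : String) (h : x ∈ l) : x.toList.length ≤ pvMaxLen l := by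
  induction l with
  | nil => simp at h
  | cons b t ih =>
    rcases List.mem_cons.mp h with rfl | h'
    · exact Nat.le_max_left _ _
    · exact le_trans (ih h') (Nat.le_max_right _ _)

lemma pvMaxLen_lt (l : List String) (n : Nat) (hn : 0 < n)
    (h : ∀ x ∈ l, x.toList.length < n) : pvMaxLen l < n := by
  induction l with
  | nil => simpa [pvMaxLen] using hn
  | cons b t ih =>
    have : pvMaxLen (b :: t) = max b.toList.length (pvMaxLen t) := rfl
    rw [this]
    exact Nat.max_lt.mpr ⟨h b List.mem_cons_self, ih (fun x hx => h x (List.mem_cons_of_mem _ hx))⟩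

lemma pvFrontier_shrinks (seen frontier : PySem.Set String) :
    ∀ x ∈ PySem.Set.diff (pvStep frontier) seen, x.toList.length < pvMaxLen frontier := by
  intro x hx
  have hx1 : x ∈ pvStep frontier := ((PySem.Set.mem_diff _ _ _).mp hx).1
  obtain ⟨s, hs, hd, rfl⟩ := (pvStep_mem frontier x).mp hx1
  exact lt_of_lt_of_le (pvParent_len s hd) (pvMaxLen_le _ _ hs)

-- the while loop: while frontier: frontier = {parent(s) …} - seen; seen |= frontier
def pvBfs (seen frontier : PySem.Set String) : PySem.Set String :=
  if _h : frontier = [] then seen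
  else
    pvBfs (PySem.Set.union seen (PySem.Set.diff (pvStep frontier) seen))
          (PySem.Set.diff (pvStep frontier) seen)
termination_by pvMaxLen frontier + (if frontier = [] then 0 else 1)
decreasing_by
  rw [if_neg _h]
  by_cases hf : PySem.Set.diff (pvStep frontier) seen = []
  · rw [hf, if_pos rfl]
    simp [pvMaxLen]
  · rw [if_neg hf]
    obtain ⟨x, hx⟩ := List.exists_mem_of_ne_nil _ hf
    have h0 : 0 < pvMaxLen frontier :=
      lt_of_le_of_lt (Nat.zero_le _) (pvFrontier_shrinks seen frontier x hx)
    have := pvMaxLen_lt _ _ h0 (pvFrontier_shrinks seen frontier)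
    omega

def get_full_hierarchy_alt (hierarchy : List String) : List String :=
  PySem.List.sorted
    (pvBfs (PySem.Set.ofList hierarchy) (PySem.Set.ofList hierarchy))
    (fun x => x)

-- ===== PRECONDITION & SPEC =====
def Spec_get_full_hierarchy (hierarchy : List String) (out : List String) : Prop := out = get_full_hierarchy_alt hierarchy
instance (hierarchy : List String) (out : List String) : Decidable (Spec_get_full_hierarchy hierarchy out) := by unfold Spec_get_full_hierarchy; infer_instance

-- ===== CLAIM (what is proved, stated in full; the proofs are below) =====
def Claim_equal_get_full_hierarchy : Prop := ∀ (hierarchy : List String), Dom_get_full_hierarchy hierarchy → Spec_get_full_hierarchy hierarchy (get_full_hierarchy hierarchy)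

-- ===== LEMMAS AND PROOFS =====

-- structural model of h.split('.')
def pvSp (l : List Char) (cur : List Char) : List (List Char) :=
  match l with
  | [] => [cur.reverse]
  | c :: rest => if c = '.' then cur.reverse :: pvSp rest [] else pvSp rest (c :: cur)

-- proper dotted prefixes of a parts list, in order of increasing length
def pvJ : List (List Char) → List (List Char)
  | [] => []
  | [_] => []
  | p :: q :: rest => p :: (pvJ (q :: rest)).map (fun j => p ++ ['.'] ++ j)

-- proper dotted prefixes of a string, in order of increasing length
def pvPrefs : List Char → List (List Char)
  | [] => []
  | c :: rest => (if c = '.' then [([] : List Char)] else []) ++ (pvPrefs rest).map (c :: ·)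

-- proper dotted prefixes, as Strings
def pvPstr (s : String) : List String := (pvPrefs s.toList).map String.ofList

-- index of the last '.' in a string
def pvLastDot? : List Char → Option Nat
  | [] => none
  | c :: rest =>
    match pvLastDot? rest with
    | some k => some (k+1)
    | none => if c = '.' then some 0 else none

-- the joins of A's inner loop, over Nat indices
def pvJL (ps : List (List Char)) : List (List Char) :=
  (List.range (ps.length - 1)).map (fun k => PySem.Chars.join ['.'] (ps.take (k+1)))

lemma pvSp_go (l : List Char) : ∀ (fuel : Nat) (cur : List Char) (acc : List (List Char)),
    l.length < fuel → PySem.Chars.splitOn.go ['.'] fuel l cur acc = acc.reverse ++ pvSp l cur := by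
  induction l with
  | nil =>
    intro fuel cur acc hf
    obtain ⟨f, rfl⟩ := Nat.exists_eq_succ_of_ne_zero (by omega : fuel ≠ 0)
    simp [PySem.Chars.splitOn.go, pvSp]
  | cons c rest ih =>
    intro fuel cur acc hf
    obtain ⟨f, rfl⟩ := Nat.exists_eq_succ_of_ne_zero (by omega : fuel ≠ 0)
    by_cases hc : c = '.'
    · subst hc
      have hpre : List.isPrefixOf ['.'] ('.' :: rest) = true := by simp [List.isPrefixOf]
      simp only [PySem.Chars.splitOn.go, hpre, if_true]
      rw [show List.drop (List.length ['.']) ('.' :: rest) = rest by simp]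
      rw [ih f [] (cur.reverse :: acc) (by simp at hf ⊢; omega)]
      simp [pvSp]
    · have hpre : List.isPrefixOf ['.'] (c :: rest) = false := by
        simp [List.isPrefixOf]
        exact fun h => hc h.symm
      simp only [PySem.Chars.splitOn.go, hpre, Bool.false_eq_true, if_false]
      rw [ih f (c :: cur) acc (by simp at hf ⊢; omega)]
      simp [pvSp, hc]

lemma pvSplitOn_eq (cs : List Char) : PySem.Chars.splitOn cs ['.'] = pvSp cs [] := by
  have h : PySem.Chars.splitOn cs ['.'] = PySem.Chars.splitOn.go ['.'] (cs.length + 1) cs [] [] := rfl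
  rw [h, pvSp_go cs (cs.length + 1) [] [] (by omega)]
  simp

lemma pvSp_ne_nil (l cur : List Char) : pvSp l cur ≠ [] := by
  induction l generalizing cur with
  | nil => simp [pvSp]
  | cons c rest ih =>
    simp only [pvSp]
    split
    · simp
    · exact ih _

lemma pvSp_cur (l : List Char) : ∀ cur : List Char,
    pvSp l cur = (pvSp l []).modifyHead (fun p => cur.reverse ++ p) := by
  induction l with
  | nil => intro cur; simp [pvSp]
  | cons c rest ih =>
    intro cur
    by_cases hc : c = '.'
    · simp [pvSp, hc]
    · simp only [pvSp, if_neg hc]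
      rw [ih (c :: cur), ih [c]]
      cases hsp : pvSp rest [] with
      | nil => exact absurd hsp (pvSp_ne_nil rest [])
      | cons p t => simp

lemma pvPrefs_eq_J (cs : List Char) : pvPrefs cs = pvJ (pvSp cs []) := by
  induction cs with
  | nil => simp [pvPrefs, pvSp, pvJ]
  | cons c rest ih =>
    by_cases hc : c = '.'
    · subst hc
      simp only [pvPrefs, pvSp, List.reverse_nil]
      cases hsp : pvSp rest [] with
      | nil => exact absurd hsp (pvSp_ne_nil rest [])
      | cons p t =>
        rw [ih, hsp]
        simp [pvJ]
    · simp only [pvPrefs, pvSp, if_neg hc]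
      rw [pvSp_cur rest [c], ih]
      cases hsp : pvSp rest [] with
      | nil => exact absurd hsp (pvSp_ne_nil rest [])
      | cons p t =>
        cases t with
        | nil => simp [pvJ, List.modifyHead]
        | cons q t' =>
          simp [pvJ, List.modifyHead, List.map_map, Function.comp]

lemma pvJL_eq_J (ps : List (List Char)) (h : ps ≠ []) : pvJL ps = pvJ ps := by
  induction ps with
  | nil => exact absurd rfl h
  | cons p t ih =>
    cases t with
    | nil => simp [pvJL, pvJ]
    | cons q t' =>
      have hlen : (p :: q :: t').length - 1 = t'.length + 1 := by simp
      simp only [pvJL, pvJ, hlen]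
      rw [List.range_succ_eq_map]
      simp only [List.map_cons, List.map_map]
      congr 1
      · simp [PySem.Chars.join_singleton]
      rw [← ih (by simp)]
      simp only [pvJL]
      have hlen2 : (q :: t').length - 1 = t'.length := by simp
      rw [hlen2, List.map_map]
      apply List.map_congr_left
      intro k hk
      simp only [Function.comp, Nat.succ_eq_add_one]
      rw [show (p :: q :: t').take (k + 1 + 1) = p :: q :: t'.take k by simp,
          show (q :: t').take (k + 1) = q :: t'.take k by simp,
          PySem.Chars.join_cons_cons]

lemma pvLastDot_none (cs : List Char) (h : pvLastDot? cs = none) :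
    ∀ m : Nat, List.isPrefixOf ['.'] (cs.drop m) = false := by
  induction cs with
  | nil => intro m; simp
  | cons c rest ih =>
    intro m
    simp only [pvLastDot?] at h
    cases hld : pvLastDot? rest with
    | some k => rw [hld] at h; cases h
    | none =>
      rw [hld] at h
      have hc : ¬ c = '.' := by
        intro hc; rw [if_pos hc] at h; cases h
      cases m with
      | zero =>
        simp [List.isPrefixOf]
        exact fun h' => hc h'.symm
      | succ m' => simpa using ih hld m'

lemma pvLastDot_some (cs : List Char) : ∀ k : Nat, pvLastDot? cs = some k →
    k < cs.length ∧ List.isPrefixOf ['.'] (cs.drop k) = true ∧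
      ∀ m, k < m → List.isPrefixOf ['.'] (cs.drop m) = false := by
  induction cs with
  | nil => intro k h; simp [pvLastDot?] at h
  | cons c rest ih =>
    intro k h
    simp only [pvLastDot?] at h
    cases hld : pvLastDot? rest with
    | some k' =>
      rw [hld] at h
      obtain rfl : k'+1 = k := Option.some.inj h
      obtain ⟨h1, h2, h3⟩ := ih k' hld
      refine ⟨by simpa using Nat.succ_lt_succ h1, by simpa using h2, ?_⟩
      intro m hm
      cases m with
      | zero => omega
      | succ m' => simpa using h3 m' (by omega)
    | none =>
      rw [hld] at h
      by_cases hc : c = '.'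
      · rw [if_pos hc] at h
        obtain rfl : 0 = k := Option.some.inj h
        refine ⟨by simp, by simp [List.isPrefixOf, hc], ?_⟩
        intro m hm
        cases m with
        | zero => omega
        | succ m' => simpa using pvLastDot_none rest hld m'
      · rw [if_neg hc] at h; cases h

lemma pvRfind_eq_lastDot (cs : List Char) :
    PySem.Chars.rfind cs ['.'] =
      (match pvLastDot? cs with | none => -1 | some k => (k : Int)) := by
  have hs : PySem.Chars.rfind cs ['.'] = PySem.Chars.rfind.go cs ['.'] cs.length := rfl
  rcases pvRfindGo_spec cs ['.'] cs.length with ⟨h1, h2⟩ | ⟨k, hk, hgo, hp, hmax⟩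
  · cases hld : pvLastDot? cs with
    | none => simpa [hs] using h1
    | some k =>
      obtain ⟨hlt, hpf, _⟩ := pvLastDot_some cs k hld
      have := h2 k (by omega)
      rw [hpf] at this
      cases this
  · cases hld : pvLastDot? cs with
    | none =>
      have := pvLastDot_none cs hld k
      rw [hp] at this
      cases this
    | some k' =>
      obtain ⟨hlt, hpf, hmax'⟩ := pvLastDot_some cs k' hld
      have e1 : ¬ k' < k := by
        intro hlt2
        have := hmax' k hlt2
        rw [hp] at this
        cases this
      have e2 : ¬ k < k' := by
        intro hlt2
        have := hmax k' hlt2 (by omega)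
        rw [hpf] at this
        cases this
      have hkk : k = k' := by omega
      rw [hs, hgo, hkk]

lemma pvPrefs_nil_of_none (cs : List Char) (h : pvLastDot? cs = none) : pvPrefs cs = [] := by
  induction cs with
  | nil => simp [pvPrefs]
  | cons c rest ih =>
    simp only [pvLastDot?] at h
    cases hld : pvLastDot? rest with
    | some k => rw [hld] at h; cases h
    | none =>
      rw [hld] at h
      have hc : ¬ c = '.' := by intro hc; rw [if_pos hc] at h; cases h
      simp [pvPrefs, if_neg hc, ih hld]

lemma pvPrefs_take (cs : List Char) : ∀ k : Nat, pvLastDot? cs = some k →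
    pvPrefs cs = pvPrefs (cs.take k) ++ [cs.take k] := by
  induction cs with
  | nil => intro k h; simp [pvLastDot?] at h
  | cons c rest ih =>
    intro k h
    simp only [pvLastDot?] at h
    cases hld : pvLastDot? rest with
    | some k' =>
      rw [hld] at h
      obtain rfl : k'+1 = k := Option.some.inj h
      simp only [pvPrefs, List.take_succ_cons]
      rw [ih k' hld]
      simp
    | none =>
      rw [hld] at h
      by_cases hc : c = '.'
      · rw [if_pos hc] at h
        obtain rfl : 0 = k := Option.some.inj h
        simp [pvPrefs, hc, pvPrefs_nil_of_none rest hld]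
      · rw [if_neg hc] at h; cases h

lemma pvMem_foldl_add {β : Type} (L : List β) (g : β → String) :
    ∀ (acc : PySem.Set String) (x : String),
      x ∈ L.foldl (fun a b => PySem.Set.add a (g b)) acc ↔ x ∈ acc ∨ x ∈ L.map g := by
  induction L with
  | nil => intro acc x; simp
  | cons b L ih =>
    intro acc x
    simp only [List.foldl_cons, List.map_cons, List.mem_cons]
    rw [ih, PySem.Set.mem_add]
    tauto

lemma pvNodup_foldl {β : Type} (f : PySem.Set String → β → PySem.Set String)
    (hf : ∀ acc b, List.Nodup acc → List.Nodup (f acc b)) :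
    ∀ (L : List β) (acc : PySem.Set String), List.Nodup acc → List.Nodup (L.foldl f acc) := by
  intro L
  induction L with
  | nil => intro acc h; simpa using h
  | cons b L ih => intro acc h; exact ih _ (hf acc b h)

lemma pvMem_foldl (f : PySem.Set String → String → PySem.Set String) (g : String → List String)
    (hf : ∀ acc h x, x ∈ f acc h ↔ x ∈ acc ∨ x ∈ g h) :
    ∀ (L : List String) (acc : PySem.Set String) (x : String),
      x ∈ L.foldl f acc ↔ x ∈ acc ∨ ∃ h ∈ L, x ∈ g h := by
  intro L
  induction L with
  | nil => intro acc x; simp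
  | cons b L ih =>
    intro acc x
    simp only [List.foldl_cons, List.mem_cons]
    rw [ih, hf]
    constructor
    · rintro ((h | h) | ⟨h', hh, hx⟩)
      · exact Or.inl h
      · exact Or.inr ⟨b, Or.inl rfl, h⟩
      · exact Or.inr ⟨h', Or.inr hh, hx⟩
    · rintro (h | ⟨h', (rfl | hh), hx⟩)
      · exact Or.inl (Or.inl h)
      · exact Or.inl (Or.inr hx)
      · exact Or.inr ⟨h', hh, hx⟩

lemma pvA_values (cs : List Char) :
    (PySem.List.pyRange 1 ((PySem.Chars.splitOn cs ['.']).length : Int)).map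
      (fun i => String.ofList (PySem.Chars.join ['.']
        (PySem.List.slice (PySem.Chars.splitOn cs ['.']) none (some i))))
    = (pvPrefs cs).map String.ofList := by
  have hne : PySem.Chars.splitOn cs ['.'] ≠ [] := by
    rw [pvSplitOn_eq]; exact pvSp_ne_nil cs []
  rw [PySem.List.pyRange_one]
  have h1 : (((PySem.Chars.splitOn cs ['.']).length : Int) - 1).toNat
      = (PySem.Chars.splitOn cs ['.']).length - 1 := by omega
  rw [h1, List.map_map]
  have h2 : ∀ k ∈ List.range ((PySem.Chars.splitOn cs ['.']).length - 1),
      ((fun i => String.ofList (PySem.Chars.join ['.']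
        (PySem.List.slice (PySem.Chars.splitOn cs ['.']) none (some i)))) ∘
        (fun k : Nat => (1 : Int) + (k : Int))) k
      = String.ofList (PySem.Chars.join ['.'] ((PySem.Chars.splitOn cs ['.']).take (k+1))) := by
    intro k hk
    simp only [Function.comp]
    rw [show (1 : Int) + (k : Int) = ((k+1 : Nat) : Int) by push_cast; ring,
        PySem.List.slice_to_natCast]
  rw [List.map_congr_left h2]
  have h3 : (List.range ((PySem.Chars.splitOn cs ['.']).length - 1)).map
      (fun k => String.ofList (PySem.Chars.join ['.'] ((PySem.Chars.splitOn cs ['.']).take (k+1))))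
      = (pvJL (PySem.Chars.splitOn cs ['.'])).map String.ofList := by
    simp [pvJL, List.map_map, Function.comp]
  rw [h3, pvJL_eq_J _ hne, pvPrefs_eq_J, pvSplitOn_eq]

-- ===== B-side lemmas: the BFS closure collects exactly the dotted prefixes =====

lemma pvPstr_nil (s : String) (h : pvLastDot? s.toList = none) : pvPstr s = [] := by
  unfold pvPstr
  rw [pvPrefs_nil_of_none s.toList h]
  rfl

lemma pvPstr_parent (s : String) (k : Nat) (hld : pvLastDot? s.toList = some k) :
    pvPstr s = pvPstr (pvParentStr s) ++ [pvParentStr s] := by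
  have hr : PySem.Chars.rfind s.toList ['.'] = (k : Int) := by rw [pvRfind_eq_lastDot, hld]
  have htl : (pvParentStr s).toList = s.toList.take k := by
    unfold pvParentStr
    rw [hr, pvToList_ofList, PySem.Chars.slice_eq_listSlice,
        PySem.List.slice_to _ (Int.natCast_nonneg k)]
    simp
  have hstr : pvParentStr s = String.ofList (s.toList.take k) := by
    unfold pvParentStr
    rw [hr, PySem.Chars.slice_eq_listSlice, PySem.List.slice_to _ (Int.natCast_nonneg k)]
    simp
  unfold pvPstr
  rw [pvPrefs_take s.toList k hld, htl, hstr]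
  simp

lemma pvHasDot_of_lastDot (s : String) (k : Nat) (hld : pvLastDot? s.toList = some k) :
    ¬ PySem.Chars.rfind s.toList ['.'] = -1 := by
  rw [pvRfind_eq_lastDot, hld]
  show ¬ ((k : Int) = -1)
  omega

lemma pvLastDot_of_hasDot (s : String) (h : ¬ PySem.Chars.rfind s.toList ['.'] = -1) :
    ∃ k, pvLastDot? s.toList = some k := by
  cases hld : pvLastDot? s.toList with
  | none =>
    exfalso
    apply h
    rw [pvRfind_eq_lastDot, hld]
  | some k => exact ⟨k, rfl⟩

lemma pvParent_mem_Pstr (s : String) (h : ¬ PySem.Chars.rfind s.toList ['.'] = -1) :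
    pvParentStr s ∈ pvPstr s := by
  obtain ⟨k, hld⟩ := pvLastDot_of_hasDot s h
  rw [pvPstr_parent s k hld]
  simp

lemma pvPstr_parent_subset (s : String) (h : ¬ PySem.Chars.rfind s.toList ['.'] = -1)
    (x : String) (hx : x ∈ pvPstr (pvParentStr s)) : x ∈ pvPstr s := by
  obtain ⟨k, hld⟩ := pvLastDot_of_hasDot s h
  rw [pvPstr_parent s k hld]
  exact List.mem_append_left _ hx

-- everything reachable from a string already in `seen` is covered by the next state
lemma pvCover (seen frontier : PySem.Set String)
    (h2 : ∀ q ∈ seen, q ∉ frontier → ¬ PySem.Chars.rfind q.toList ['.'] = -1 →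
      pvParentStr q ∈ seen) :
    ∀ (n : Nat) (s : String), s.toList.length ≤ n → s ∈ seen →
      ∀ x ∈ pvPstr s,
        x ∈ PySem.Set.union seen (PySem.Set.diff (pvStep frontier) seen) ∨
          ∃ t ∈ PySem.Set.diff (pvStep frontier) seen, x ∈ pvPstr t := by
  intro n
  induction n with
  | zero =>
    intro s hs hseen x hx
    have hnil : s.toList = [] := List.eq_nil_of_length_eq_zero (by omega)
    have hld : pvLastDot? s.toList = none := by rw [hnil]; rfl
    rw [pvPstr_nil s hld] at hx
    simp at hx
  | succ n ih =>
    intro s hs hseen x hx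
    cases hld : pvLastDot? s.toList with
    | none =>
      rw [pvPstr_nil s hld] at hx
      simp at hx
    | some k =>
      have hdot : ¬ PySem.Chars.rfind s.toList ['.'] = -1 := pvHasDot_of_lastDot s k hld
      have hq : pvParentStr s ∈ seen ∨
          pvParentStr s ∈ PySem.Set.diff (pvStep frontier) seen := by
        by_cases hsf : s ∈ frontier
        · by_cases hps : pvParentStr s ∈ seen
          · exact Or.inl hps
          · exact Or.inr ((PySem.Set.mem_diff _ _ _).mpr
              ⟨(pvStep_mem frontier _).mpr ⟨s, hsf, hdot, rfl⟩, hps⟩)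
        · exact Or.inl (h2 s hseen hsf hdot)
      have hlen : (pvParentStr s).toList.length ≤ n := by
        have := pvParent_len s hdot
        omega
      rw [pvPstr_parent s k hld] at hx
      rcases List.mem_append.mp hx with hx' | hx'
      · rcases hq with hseen' | hf
        · exact ih (pvParentStr s) hlen hseen' x hx'
        · exact Or.inr ⟨pvParentStr s, hf, hx'⟩
      · have hxp : x = pvParentStr s := by simpa using hx'
        subst hxp
        rcases hq with h' | h'
        · exact Or.inl ((PySem.Set.mem_union _ _ _).mpr (Or.inl h'))
        · exact Or.inl ((PySem.Set.mem_union _ _ _).mpr (Or.inr h'))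

lemma pvBfs_mem_aux : ∀ (n : Nat) (seen frontier : PySem.Set String),
    pvMaxLen frontier + (if frontier = [] then 0 else 1) ≤ n →
    (∀ s ∈ frontier, s ∈ seen) →
    (∀ q ∈ seen, q ∉ frontier → ¬ PySem.Chars.rfind q.toList ['.'] = -1 →
      pvParentStr q ∈ seen) →
    ∀ x, (x ∈ pvBfs seen frontier ↔ x ∈ seen ∨ ∃ s ∈ frontier, x ∈ pvPstr s) := by
  intro n
  induction n with
  | zero =>
    intro seen frontier hb h1 h2 x
    have hfr : frontier = [] := by
      by_contra hne
      rw [if_neg hne] at hb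
      omega
    rw [pvBfs, dif_pos hfr]
    simp [hfr]
  | succ n ih =>
    intro seen frontier hb h1 h2 x
    by_cases hfr : frontier = []
    · rw [pvBfs, dif_pos hfr]
      simp [hfr]
    · rw [pvBfs, dif_neg hfr]
      rw [if_neg hfr] at hb
      have hkey := pvFrontier_shrinks seen frontier
      have hb' : pvMaxLen (PySem.Set.diff (pvStep frontier) seen) +
          (if PySem.Set.diff (pvStep frontier) seen = [] then 0 else 1) ≤ n := by
        by_cases hf : PySem.Set.diff (pvStep frontier) seen = []
        · rw [hf, if_pos rfl]
          simp [pvMaxLen]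
        · rw [if_neg hf]
          obtain ⟨y, hy⟩ := List.exists_mem_of_ne_nil _ hf
          have h0 : 0 < pvMaxLen frontier := lt_of_le_of_lt (Nat.zero_le _) (hkey y hy)
          have := pvMaxLen_lt _ _ h0 hkey
          omega
      have h1' : ∀ s ∈ PySem.Set.diff (pvStep frontier) seen,
          s ∈ PySem.Set.union seen (PySem.Set.diff (pvStep frontier) seen) :=
        fun s hs => (PySem.Set.mem_union _ _ _).mpr (Or.inr hs)
      have h2' : ∀ q ∈ PySem.Set.union seen (PySem.Set.diff (pvStep frontier) seen),
          q ∉ PySem.Set.diff (pvStep frontier) seen →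
          ¬ PySem.Chars.rfind q.toList ['.'] = -1 →
          pvParentStr q ∈ PySem.Set.union seen (PySem.Set.diff (pvStep frontier) seen) := by
        intro q hq hqf hdot
        have hqseen : q ∈ seen := by
          rcases (PySem.Set.mem_union _ _ _).mp hq with h' | h'
          · exact h'
          · exact absurd h' hqf
        by_cases hqfr : q ∈ frontier
        · have hstep : pvParentStr q ∈ pvStep frontier :=
            (pvStep_mem frontier _).mpr ⟨q, hqfr, hdot, rfl⟩
          by_cases hps : pvParentStr q ∈ seen
          · exact (PySem.Set.mem_union _ _ _).mpr (Or.inl hps)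
          · exact (PySem.Set.mem_union _ _ _).mpr
              (Or.inr ((PySem.Set.mem_diff _ _ _).mpr ⟨hstep, hps⟩))
        · exact (PySem.Set.mem_union _ _ _).mpr (Or.inl (h2 q hqseen hqfr hdot))
      rw [ih _ _ hb' h1' h2' x]
      constructor
      · rintro (hx | ⟨s, hs, hx⟩)
        · rcases (PySem.Set.mem_union _ _ _).mp hx with h' | h'
          · exact Or.inl h'
          · have h'' := (PySem.Set.mem_diff _ _ _).mp h'
            obtain ⟨t, ht, hd, rfl⟩ := (pvStep_mem frontier x).mp h''.1
            exact Or.inr ⟨t, ht, pvParent_mem_Pstr t hd⟩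
        · have h'' := (PySem.Set.mem_diff _ _ _).mp hs
          obtain ⟨t, ht, hd, rfl⟩ := (pvStep_mem frontier s).mp h''.1
          exact Or.inr ⟨t, ht, pvPstr_parent_subset t hd x hx⟩
      · rintro (hx | ⟨s, hs, hx⟩)
        · exact Or.inl ((PySem.Set.mem_union _ _ _).mpr (Or.inl hx))
        · exact pvCover seen frontier h2 s.toList.length s le_rfl (h1 s hs) x hx

lemma pvBfs_nodup : ∀ (n : Nat) (seen frontier : PySem.Set String),
    pvMaxLen frontier + (if frontier = [] then 0 else 1) ≤ n →
    List.Nodup seen → List.Nodup (pvBfs seen frontier) := by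
  intro n
  induction n with
  | zero =>
    intro seen frontier hb hs
    have hfr : frontier = [] := by
      by_contra hne
      rw [if_neg hne] at hb
      omega
    rw [pvBfs, dif_pos hfr]
    exact hs
  | succ n ih =>
    intro seen frontier hb hs
    by_cases hfr : frontier = []
    · rw [pvBfs, dif_pos hfr]
      exact hs
    · rw [pvBfs, dif_neg hfr]
      rw [if_neg hfr] at hb
      have hkey := pvFrontier_shrinks seen frontier
      have hb' : pvMaxLen (PySem.Set.diff (pvStep frontier) seen) +
          (if PySem.Set.diff (pvStep frontier) seen = [] then 0 else 1) ≤ n := by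
        by_cases hf : PySem.Set.diff (pvStep frontier) seen = []
        · rw [hf, if_pos rfl]
          simp [pvMaxLen]
        · rw [if_neg hf]
          obtain ⟨y, hy⟩ := List.exists_mem_of_ne_nil _ hf
          have h0 : 0 < pvMaxLen frontier := lt_of_le_of_lt (Nat.zero_le _) (hkey y hy)
          have := pvMaxLen_lt _ _ h0 hkey
          omega
      exact ih _ _ hb' (PySem.Set.nodup_union _ _ hs)

-- ===== VERDICT (by name: the statement is the Claim_ definition above) =====
theorem get_full_hierarchy_spec : Claim_equal_get_full_hierarchy := by
  intro hierarchy _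
  unfold Spec_get_full_hierarchy get_full_hierarchy get_full_hierarchy_alt
  apply PySem.List.sorted_eq_sorted_of_perm _ _ _ (fun a b h => h)
  have hfA : ∀ (acc : PySem.Set String) (h x : String),
      x ∈ (PySem.List.pyRange 1 ((PySem.Chars.splitOn h.toList ['.']).length : Int)).foldl
        (fun acc2 i => PySem.Set.add acc2 (String.ofList (PySem.Chars.join ['.']
          (PySem.List.slice (PySem.Chars.splitOn h.toList ['.']) none (some i))))) acc
      ↔ x ∈ acc ∨ x ∈ (pvPrefs h.toList).map String.ofList := by
    intro acc h x
    rw [pvMem_foldl_add _ _ acc x, pvA_values]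
  have hA : List.Nodup (hierarchy.foldl
      (fun acc h => (PySem.List.pyRange 1 ((PySem.Chars.splitOn h.toList ['.']).length : Int)).foldl
        (fun acc2 i => PySem.Set.add acc2 (String.ofList (PySem.Chars.join ['.']
          (PySem.List.slice (PySem.Chars.splitOn h.toList ['.']) none (some i))))) acc)
      (PySem.Set.ofList hierarchy)) := by
    refine pvNodup_foldl _ ?_ hierarchy _ (PySem.Set.nodup_ofList hierarchy)
    intro acc b hacc
    exact pvNodup_foldl _ (fun a i ha => PySem.Set.nodup_add _ _ ha) _ acc hacc
  have hB : List.Nodup (pvBfs (PySem.Set.ofList hierarchy) (PySem.Set.ofList hierarchy)) :=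
    pvBfs_nodup _ _ _ le_rfl (PySem.Set.nodup_ofList hierarchy)
  rw [List.perm_ext_iff_of_nodup hA hB]
  intro x
  rw [pvMem_foldl _ _ hfA hierarchy _ x]
  rw [pvBfs_mem_aux _ _ _ le_rfl (fun s hs => hs)
    (fun q hq hqf _ => absurd hq hqf) x]
  simp [PySem.Set.mem_ofList, pvPstr]
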